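-- pv_equiv track=rewrite | github.com/marcelaRivera/proyectoOptimizacion | src/initialSolution.py | getNumberEmployersCalificatesInJobs
-- ===== SOURCE A (Python) =====
-- def getNumberEmployersCalificatesInJobs(jobsCalificate, jobs):
-- 	numberEmployers = []
-- 	cont = 0
-- 	for e in range(jobs):
-- 		cont = 0
-- 		for i in jobsCalificate:
-- 			for j in i:
-- 				if e == int(j):
-- 					cont = cont + 1
-- 		numberEmployers.append(cont)
-- 	return numberEmployers
-- ===== SOURCE B (Python) =====
-- def getNumberEmployersCalificatesInJobs(jobsCalificate, jobs):
-- 	counts = {}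
-- 	for i in jobsCalificate:
-- 		for j in i:
-- 			k = int(j)
-- 			counts[k] = counts.get(k, 0) + 1
-- 	return [counts.get(e, 0) for e in range(jobs)]
-- ===== Notes on version B (the rewrite author's own statement) =====
-- stated objective: faster
-- what changed: B counts all qualifications once into a dict and then reads one count per job index, instead of A's rescan of the whole nested list for every job.
import Mathlib
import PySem

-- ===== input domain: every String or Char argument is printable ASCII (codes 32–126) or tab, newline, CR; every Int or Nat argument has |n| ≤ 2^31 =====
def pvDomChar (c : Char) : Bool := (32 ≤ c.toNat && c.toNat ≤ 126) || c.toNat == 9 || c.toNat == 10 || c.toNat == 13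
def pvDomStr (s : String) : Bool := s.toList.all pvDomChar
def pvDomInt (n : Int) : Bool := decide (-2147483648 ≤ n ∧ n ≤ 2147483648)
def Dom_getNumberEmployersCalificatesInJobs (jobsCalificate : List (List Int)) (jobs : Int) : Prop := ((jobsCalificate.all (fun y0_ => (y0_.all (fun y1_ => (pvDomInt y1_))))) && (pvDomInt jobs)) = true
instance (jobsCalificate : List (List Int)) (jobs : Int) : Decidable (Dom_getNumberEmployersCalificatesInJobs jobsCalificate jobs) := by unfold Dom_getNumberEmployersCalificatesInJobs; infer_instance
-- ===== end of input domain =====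

-- B counts all qualifications once into a dict, then reads one count per job index (asymptotically faster than A's per-job rescan).
-- ===== PORT A =====
-- A loops e over range(jobs) and, for each e, rescans every entry j of every inner list,
-- incrementing cont when e == int(j) (int(j) on an int is the identity).
def getNumberEmployersCalificatesInJobs (jobsCalificate : List (List Int)) (jobs : Int) : List Int :=
  (PySem.List.pyRange 0 jobs 1).foldl (fun numberEmployers e =>
    numberEmployers ++ [jobsCalificate.foldl (fun cont i =>
      i.foldl (fun cont j => if e == j then cont + 1 else cont) cont) 0]) []

-- ===== PORT B =====
-- one pass building counts[k] = counts.get(k,0) + 1, then counts.get(e,0) per job index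
def getNumberEmployersCalificatesInJobs_alt (jobsCalificate : List (List Int)) (jobs : Int) : List Int :=
  let counts : PySem.Dict Int Int :=
    jobsCalificate.foldl (fun counts i =>
      i.foldl (fun counts j => counts.insert j (counts.getD j 0 + 1)) counts) PySem.Dict.empty
  (PySem.List.pyRange 0 jobs 1).map (fun e => counts.getD e 0)

-- ===== PRECONDITION & SPEC =====
def Spec_getNumberEmployersCalificatesInJobs (jobsCalificate : List (List Int)) (jobs : Int) (out : List Int) : Prop := out = getNumberEmployersCalificatesInJobs_alt jobsCalificate jobs
instance (jobsCalificate : List (List Int)) (jobs : Int) (out : List Int) : Decidable (Spec_getNumberEmployersCalificatesInJobs jobsCalificate jobs out) := by unfold Spec_getNumberEmployersCalificatesInJobs; infer_instance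

-- ===== CLAIM (what is proved, stated in full; the proofs are below) =====
def Claim_equal_getNumberEmployersCalificatesInJobs : Prop := ∀ (jobsCalificate : List (List Int)) (jobs : Int), Dom_getNumberEmployersCalificatesInJobs jobsCalificate jobs → Spec_getNumberEmployersCalificatesInJobs jobsCalificate jobs (getNumberEmployersCalificatesInJobs jobsCalificate jobs)

-- ===== LEMMAS AND PROOFS =====

-- A's innermost loop over one inner list counts occurrences of e
theorem pv_inner_count (e : Int) (l : List Int) (c : Int) :
    l.foldl (fun cont j => if e == j then cont + 1 else cont) c = c + (l.count e : Int) := by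
  induction l generalizing c with
  | nil => simp
  | cons j rest ih =>
    rw [List.foldl_cons, List.count_cons, ih]
    by_cases h : e = j
    · rw [if_pos (by simp [h]), if_pos (by simp [h])]
      push_cast; ring
    · rw [if_neg (by simp [h]), if_neg (by simp [Ne.symm h])]
      simp

-- A's double loop from 0 equals the total count of e over all inner lists
theorem pv_A_count (e : Int) (jc : List (List Int)) (c : Int) :
    jc.foldl (fun cont i => i.foldl (fun cont j => if e == j then cont + 1 else cont) cont) c
      = c + (jc.map (fun i => (i.count e : Int))).sum := by
  induction jc generalizing c with
  | nil => simp
  | cons i rest ih =>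
    rw [List.foldl_cons, ih, pv_inner_count]
    simp [add_assoc]

-- B's counting dict reads back the same total count
theorem pv_B_count (e : Int) (jc : List (List Int)) (d : PySem.Dict Int Int) :
    (jc.foldl (fun counts i =>
        i.foldl (fun counts j => counts.insert j (counts.getD j 0 + 1)) counts) d).getD e 0
      = d.getD e 0 + (jc.map (fun i => (i.count e : Int))).sum := by
  induction jc generalizing d with
  | nil => simp
  | cons i rest ih =>
    simp [List.foldl_cons, ih, PySem.Dict.getD_foldl_insert_add_one, add_assoc]

-- ===== VERDICT (by name: the statement is the Claim_ definition above) =====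
theorem getNumberEmployersCalificatesInJobs_spec : Claim_equal_getNumberEmployersCalificatesInJobs := by
  intro jobsCalificate jobs _
  show _ = _
  unfold getNumberEmployersCalificatesInJobs getNumberEmployersCalificatesInJobs_alt
  rw [PySem.List.foldl_append_singleton_eq_map]
  simp only [List.nil_append]
  refine List.map_congr_left (fun e _ => ?_)
  rw [pv_A_count, pv_B_count]
  simp
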